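-- pv_equiv track=rewrite | github.com/TejahniDesire/DungeonMaster5e | Scripts/objectF/dataBase.py | suffixDepth
-- ===== SOURCE A (Python) =====
-- def suffixDepth(list,key,depth = 0):
--
--     if depth == 0:
--         tkey = key
--     else:
--         tkey = key + "({})".format(depth)
--     if tkey in list:
--         return suffixDepth(list,key,depth + 1)
--
--     else:
--         if depth == 0:
--             return key
--
--         else:
--             return tkey
-- ===== SOURCE B (Python) =====
-- def suffixDepth(list, key, depth=0):
--     # Stage 1: collect every free depth in the window range(depth, depth+len(list)+1)
--     # (pigeonhole: distinct depths give distinct variants, so at most len(list) of the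
--     # len(list)+1 window depths can be occupied; hence `free` is never empty).
--     free = [d for d in range(depth, depth + len(list) + 1)
--             if (key if d == 0 else "{}({})".format(key, d)) not in list]
--     # Stage 2: the answer is the variant of the first free depth.
--     d = free[0]
--     return key if d == 0 else "{}({})".format(key, d)
-- ===== Notes on version B (the rewrite author's own statement) =====
-- stated objective: alternative
-- what changed: Replaces A's unbounded tail recursion by a bounded two-stage computation: a comprehension collecting all free depths in the provably sufficient window range(depth, depth+len(list)+1), then the variant of the first of them.
import Mathlib
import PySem

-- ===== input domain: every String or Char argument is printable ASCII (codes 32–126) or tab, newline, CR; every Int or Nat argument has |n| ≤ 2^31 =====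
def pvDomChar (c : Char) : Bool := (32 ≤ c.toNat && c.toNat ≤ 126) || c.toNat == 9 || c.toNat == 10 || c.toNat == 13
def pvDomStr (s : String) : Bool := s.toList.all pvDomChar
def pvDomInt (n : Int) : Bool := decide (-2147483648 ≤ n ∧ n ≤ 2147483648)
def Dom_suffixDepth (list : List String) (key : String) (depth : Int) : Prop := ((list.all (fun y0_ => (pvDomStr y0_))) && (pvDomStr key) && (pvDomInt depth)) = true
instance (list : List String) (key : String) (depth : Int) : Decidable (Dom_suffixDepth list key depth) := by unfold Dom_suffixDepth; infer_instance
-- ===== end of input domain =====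

-- B replaces A's unbounded tail recursion by a bounded two-stage computation: first
-- collect all free depths of the sufficient window, then format the first of them.

-- ===== PORT A =====
-- A's recursion has no structural measure in Lean; `fuel = list.length + 1` is a
-- termination bound only (at most list.length successive variants can be members,
-- since distinct depths give distinct strings), it is never exhausted in practice.
def suffixDepthGo (fuel : Nat) (list : List String) (key : String) (depth : Int) : String :=
  match fuel with
  | 0 => key
  | f + 1 =>
    let tkey := if depth = 0 then key else key ++ "(" ++ PySem.Int.toStr depth ++ ")"
    if tkey ∈ list then suffixDepthGo f list key (depth + 1)
    else if depth = 0 then key else tkey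

def suffixDepth (list : List String) (key : String) (depth : Int) : String :=
  suffixDepthGo (list.length + 1) list key depth

-- ===== PORT B =====
-- the candidate string of depth d: `key if d == 0 else "{}({})".format(key, d)`
def pvVariant (key : String) (d : Int) : String :=
  if d = 0 then key else key ++ "(" ++ PySem.Int.toStr d ++ ")"

-- stage 1 of Source B: the free depths of the window, as a filter of the range
def pvFreeDepths (list : List String) (key : String) (depth : Int) : List Int :=
  (PySem.List.pyRange depth (depth + (list.length : Int) + 1) 1).filter
    (fun d => decide (pvVariant key d ∉ list))

-- stage 2 of Source B: `free[0]` then format.  Python raises IndexError on an empty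
-- `free`, which is unreachable (pigeonhole over the window); the [] arm is the
-- unreachable placeholder for that.
def suffixDepth_alt (list : List String) (key : String) (depth : Int) : String :=
  match pvFreeDepths list key depth with
  | [] => key
  | d :: _ => pvVariant key d

-- ===== PRECONDITION & SPEC =====
def Spec_suffixDepth (list : List String) (key : String) (depth : Int) (out : String) : Prop := out = suffixDepth_alt list key depth
instance (list : List String) (key : String) (depth : Int) (out : String) : Decidable (Spec_suffixDepth list key depth out) := by unfold Spec_suffixDepth; infer_instance

-- ===== CLAIM (what is proved, stated in full; the proofs are below) =====
def Claim_equal_suffixDepth : Prop := ∀ (list : List String) (key : String) (depth : Int), Dom_suffixDepth list key depth → Spec_suffixDepth list key depth (suffixDepth list key depth)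

-- ===== LEMMAS AND PROOFS =====
-- A's fueled loop over depths d, d+1, … equals "format the first free depth of the
-- window [d, d+k)", with matching fallbacks when the window is exhausted.
theorem go_eq_first_free (k : Nat) (list : List String) (key : String) (d : Int) :
    suffixDepthGo k list key d
      = match (PySem.List.pyRange d (d + k) 1).filter
            (fun e => decide (pvVariant key e ∉ list)) with
        | [] => key
        | e :: _ => pvVariant key e := by
  induction k generalizing d with
  | zero =>
    rw [PySem.List.pyRange_one_eq_nil (by omega)]
    rfl
  | succ f ih =>
    rw [PySem.List.pyRange_one_cons (by omega)]
    show (if (if d = 0 then key else _) ∈ list then _ else _) = _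
    rw [List.filter_cons]
    by_cases h : pvVariant key d ∈ list
    · have hA : (if d = 0 then key else key ++ "(" ++ PySem.Int.toStr d ++ ")") ∈ list := h
      simp only [hA, if_pos, h, decide_not, decide_eq_true_eq, not_true, decide_false,
        Bool.not_true, if_neg, Bool.false_eq_true, not_false_iff, ih]
      have : d + 1 + (f : Int) = d + (f + 1 : Nat) := by push_cast; ring
      rw [this]
    · have hA : (if d = 0 then key else key ++ "(" ++ PySem.Int.toStr d ++ ")") ∉ list := h
      simp only [hA, if_neg, h, not_false_iff, decide_true]
      by_cases hd : d = 0 <;> simp [hd, pvVariant]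

-- ===== VERDICT (by name: the statement is the Claim_ definition above) =====
theorem suffixDepth_spec : Claim_equal_suffixDepth := by
  intro list key depth _
  unfold Spec_suffixDepth suffixDepth suffixDepth_alt pvFreeDepths
  rw [go_eq_first_free]
  have : depth + ((list.length + 1 : Nat) : Int) = depth + (list.length : Int) + 1 := by
    push_cast; ring
  rw [this]
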